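-- pv_equiv track=rewrite | github.com/e5pe0n/algorithm-training | cracking_the_coding_interview_6th/chapter17/python/17_09_v03.py | find_kth_mul
-- ===== SOURCE A (Python) =====
-- from typing import List
-- from collections import deque
--
-- def find_kth_mul(ps: List[int], k: int) -> int:
--     if k < 0:
--         return 0
--     val = 0
--     qs = [deque() for _ in range(len(ps))]
--     qs[0].append(1)
--     for _ in range(k):
--         mi = qs[0][0]
--         mi_idx = 0
--         for i, q in enumerate(qs):
--             if len(q) and mi > q[0]:
--                 mi = q[0]
--                 mi_idx = i
--         val = mi
--         qs[mi_idx].popleft()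
--         for i in range(mi_idx, len(qs)):
--             qs[i].append(mi * ps[i])
--     return val
-- ===== SOURCE B (Python) =====
-- def find_kth_mul(ps, k):
--     # Pointer-into-pop-history algorithm (ugly-number style): instead of n
--     # deques of materialised children, keep the list `hist` of popped
--     # (value, source-queue-index) pairs and, per queue i, a cursor ptr[i]
--     # into it.  Queue i's pending entries are exactly the popped pairs
--     # (v, idx) with idx <= i at/after its cursor, each worth v * ps[i];
--     # queue 0 additionally starts holding the seed 1.  Cursors are kept
--     # normalized (never resting on a pair with idx > i), so each queue's
--     # front is read off directly from hist.
--     if k < 0: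
--         return 0
--     n = len(ps)
--     val = 0
--     hist = []        # popped (value, queue index), in pop order
--     ptr = [0] * n    # ptr[i]: position in hist of queue i's front feed
--     seeded = True    # the initial 1 in queue 0 is still unconsumed
--     for _ in range(k):
--         best = None  # (front value, queue index), first minimum
--         for i in range(n):
--             if i == 0 and seeded:
--                 f = 1
--             elif ptr[i] < len(hist):
--                 f = hist[ptr[i]][0] * ps[i]
--             else:
--                 continue
--             if best is None or f < best[0]:
--                 best = (f, i)
--         val, mi_idx = best
--         if mi_idx == 0 and seeded:
--             seeded = False
--         else:
--             ptr[mi_idx] += 1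
--         hist.append((val, mi_idx))
--         for i in range(n):
--             while ptr[i] < len(hist) and hist[ptr[i]][1] > i:
--                 ptr[i] += 1
--     return val
-- ===== Notes on version B (the rewrite author's own statement) =====
-- stated objective: alternative
-- what changed: Replaces A's n materialised deques (each pop appends up to n child values into explicit queues) by the ugly-number-style pointer algorithm: one shared list of popped (value, source-index) pairs plus a normalized cursor per virtual queue, from which each queue front is derived lazily.
import Mathlib
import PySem

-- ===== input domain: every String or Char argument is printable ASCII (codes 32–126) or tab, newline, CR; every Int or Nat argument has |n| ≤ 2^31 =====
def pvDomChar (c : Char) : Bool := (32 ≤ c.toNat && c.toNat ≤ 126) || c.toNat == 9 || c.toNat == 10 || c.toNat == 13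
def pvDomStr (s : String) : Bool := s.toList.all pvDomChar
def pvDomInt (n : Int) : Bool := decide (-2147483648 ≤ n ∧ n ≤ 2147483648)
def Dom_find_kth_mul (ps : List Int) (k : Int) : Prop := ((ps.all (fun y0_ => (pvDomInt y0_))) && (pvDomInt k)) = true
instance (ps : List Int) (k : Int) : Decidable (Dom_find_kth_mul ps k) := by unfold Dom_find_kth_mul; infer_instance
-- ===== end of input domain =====

-- B replaces A's n materialised deques by one list of popped (value, index)
-- pairs plus a normalized cursor per virtual queue (ugly-number-style pointer
-- algorithm); equal return value proved on Pre_ (A mutates nothing observable).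

-- ===== PORT A =====
-- one scan step of `for i, q in enumerate(qs): if len(q) and mi > q[0]: …`
-- (enumerate ported as iteration over the index range, q = qs[i]; exact)
def pvScanA (qs : List (List Int)) (m : Int × Nat) (i : Nat) : Int × Nat :=
  match qs.getD i [] with
  | [] => m
  | h :: _ => if m.1 > h then (h, i) else m

-- one iteration of A's `for _ in range(k)` body; state = (val, qs)
def pvStepA (ps : List Int) (s : Int × List (List Int)) : Int × List (List Int) :=
  let qs := s.2
  let mi0 := (qs.getD 0 []).getD 0 0                       -- mi = qs[0][0]
  let m := (List.range qs.length).foldl (pvScanA qs) (mi0, 0)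
  let qs1 := qs.modify m.2 (fun q => q.drop 1)             -- qs[mi_idx].popleft()
  let qs2 := (List.range' m.2 (qs1.length - m.2)).foldl    -- for i in range(mi_idx, len(qs))
      (fun qs i => qs.modify i (fun q => q ++ [m.1 * ps.getD i 0])) qs1
  (m.1, qs2)

def pvLoopA (ps : List Int) : Nat → (Int × List (List Int)) → Int
  | 0, s => s.1
  | t+1, s => pvLoopA ps t (pvStepA ps s)

def find_kth_mul (ps : List Int) (k : Int) : Int :=
  if k < 0 then 0
  else
    -- qs = [deque() for _ in ps]; qs[0].append(1)
    -- (when ps = [] Python raises IndexError here; excluded by Pre_)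
    let qs := (ps.map (fun _ => ([] : List Int))).modify 0 (fun q => q ++ [1])
    pvLoopA ps k.toNat (0, qs)

-- ===== PORT B =====
-- B's state: val, pop history, one cursor per virtual queue, seed flag
structure PvStB where
  val : Int
  hist : List (Int × Nat)
  ptr : List Nat
  seeded : Bool
deriving Repr

-- number of steps B's `while ptr[i] < len(hist) and hist[ptr[i]][1] > i` makes,
-- counted on the suffix hist[ptr[i]:]  (exact rendering of the while loop)
def pvSkip (i : Nat) : List (Int × Nat) → Nat
  | [] => 0
  | e :: r => if i < e.2 then pvSkip i r + 1 else 0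

-- the front value B reads for queue i (`f` in Source B; none = `continue`)
def pvFrontB (ps : List Int) (hist : List (Int × Nat)) (ptr : List Nat)
    (seeded : Bool) (i : Nat) : Option Int :=
  if i = 0 ∧ seeded then some 1
  else if ptr.getD i 0 < hist.length then
    some ((hist.getD (ptr.getD i 0) (0, 0)).1 * ps.getD i 0)
  else none

-- one step of B's selection loop `for i in range(n): …`
def pvBestStep (ps : List Int) (hist : List (Int × Nat)) (ptr : List Nat)
    (seeded : Bool) (best : Option (Int × Nat)) (i : Nat) : Option (Int × Nat) :=
  match pvFrontB ps hist ptr seeded i with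
  | none => best
  | some f =>
    match best with
    | none => some (f, i)
    | some b => if f < b.1 then some (f, i) else some b

-- one iteration of B's `for _ in range(k)` body
def pvStepB (ps : List Int) (s : PvStB) : PvStB :=
  let n := ps.length
  let best := (List.range n).foldl (pvBestStep ps s.hist s.ptr s.seeded) none
  match best with
  | none => s   -- Python raises TypeError here (only when ps = []; outside Pre_)
  | some (mi, mi_idx) =>
    let seeded' := if mi_idx = 0 ∧ s.seeded then false else s.seeded
    let ptr1 := if mi_idx = 0 ∧ s.seeded then s.ptr else s.ptr.modify mi_idx (· + 1)
    let hist' := s.hist ++ [(mi, mi_idx)]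
    -- normalization loop: advance each cursor past pairs that do not feed queue i
    let ptr2 := (List.range n).foldl
        (fun p i => p.set i (p.getD i 0 + pvSkip i (hist'.drop (p.getD i 0)))) ptr1
    { val := mi, hist := hist', ptr := ptr2, seeded := seeded' }

def pvLoopB (ps : List Int) : Nat → PvStB → Int
  | 0, s => s.val
  | t+1, s => pvLoopB ps t (pvStepB ps s)

def find_kth_mul_alt (ps : List Int) (k : Int) : Int :=
  if k < 0 then 0
  else pvLoopB ps k.toNat ⟨0, [], List.replicate ps.length 0, true⟩

-- ===== PRECONDITION & SPEC =====
-- Pre_ excludes only ps = [] with k ≥ 0, where A raises IndexError (qs[0])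
def Pre_find_kth_mul (ps : List Int) (k : Int) : Prop := k < 0 ∨ ps ≠ []
instance (ps : List Int) (k : Int) : Decidable (Pre_find_kth_mul ps k) := by
  unfold Pre_find_kth_mul; infer_instance
def pvWitness_find_kth_mul : List Int × Int := ([2, 3], 5)

def Spec_find_kth_mul (ps : List Int) (k : Int) (out : Int) : Prop := out = find_kth_mul_alt ps k
instance (ps : List Int) (k : Int) (out : Int) : Decidable (Spec_find_kth_mul ps k out) := by
  unfold Spec_find_kth_mul; infer_instance

-- ===== CLAIM (what is proved, stated in full; the proofs are below) =====
def Claim_equal_find_kth_mul : Prop := ∀ (ps : List Int) (k : Int), Dom_find_kth_mul ps k → Pre_find_kth_mul ps k → Spec_find_kth_mul ps k (find_kth_mul ps k)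

-- ===== LEMMAS AND PROOFS =====

-- the pairs of l that still feed queue i, valued for queue i
def pvFeeds (ps : List Int) (i : Nat) (l : List (Int × Nat)) : List Int :=
  (l.filter (fun e => e.2 ≤ i)).map (fun e => e.1 * ps.getD i 0)

-- simulation invariant between A's queues and B's (hist, ptr, seeded) state
def pvInv (ps : List Int) (qs : List (List Int)) (s : PvStB) : Prop :=
  qs.length = ps.length ∧ s.ptr.length = ps.length ∧
  qs.getD 0 [] ≠ [] ∧
  ∀ i, i < ps.length →
    s.ptr.getD i 0 ≤ s.hist.length ∧
    pvSkip i (s.hist.drop (s.ptr.getD i 0)) = 0 ∧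
    qs.getD i [] =
      (if i = 0 ∧ s.seeded then [1] else []) ++ pvFeeds ps i (s.hist.drop (s.ptr.getD i 0))

lemma pvSkip_le (i : Nat) (l : List (Int × Nat)) : pvSkip i l ≤ l.length := by
  induction l with
  | nil => simp [pvSkip]
  | cons e r ih => simp only [pvSkip]; split <;> simp <;> omega

lemma pvSkip_skip (i : Nat) (l : List (Int × Nat)) :
    pvSkip i (l.drop (pvSkip i l)) = 0 := by
  induction l with
  | nil => simp [pvSkip]
  | cons e r ih =>
    simp only [pvSkip]
    split
    · simpa using ih
    · simp [pvSkip, *]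

lemma pvSkip_filter (i : Nat) (l : List (Int × Nat)) :
    (l.drop (pvSkip i l)).filter (fun e => e.2 ≤ i) = l.filter (fun e => e.2 ≤ i) := by
  induction l with
  | nil => simp
  | cons e r ih =>
    simp only [pvSkip]
    split
    · rename_i hgt
      rw [List.drop_succ_cons, ih, List.filter_cons_of_neg (by simpa using hgt)]
    · simp

lemma getD_modify {α : Type} (l : List α) (i j : Nat) (f : α → α) (d : α) :
    (l.modify i f).getD j d = if i = j ∧ j < l.length then f (l.getD j d) else l.getD j d := by
  by_cases hl : j < l.length
  · simp only [List.getD_eq_getElem?_getD, List.getElem?_modify, List.getElem?_eq_getElem hl]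
    by_cases hij : i = j <;> simp [hij, hl]
  · have h0 : l[j]? = none := by simpa using List.getElem?_eq_none (Nat.le_of_not_lt hl)
    simp [List.getD_eq_getElem?_getD, List.getElem?_modify, h0, hl]

lemma pvModFold_length {α : Type} (g : Nat → α → α) (l : List α) (r : List Nat) :
    (r.foldl (fun l i => l.modify i (g i)) l).length = l.length := by
  induction r generalizing l with
  | nil => rfl
  | cons a r ih => simp [ih, List.length_modify]

lemma pvModFold {α : Type} (g : Nat → α → α) (b a : Nat) (l : List α) (j : Nat) (d : α)
    (hj : j < l.length) :
    ((List.range' a b).foldl (fun l i => l.modify i (g i)) l).getD j d =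
      if a ≤ j ∧ j < a + b then g j (l.getD j d) else l.getD j d := by
  induction b generalizing a l with
  | zero => simp
  | succ b ih =>
    rw [List.range'_succ, List.foldl_cons]
    rw [ih (a + 1) _ (by simpa [List.length_modify] using hj)]
    by_cases haj : a = j
    · subst haj
      rw [if_neg (by omega), getD_modify, if_pos ⟨rfl, hj⟩, if_pos (by omega)]
    · have hmod : (l.modify a (g a)).getD j d = l.getD j d := by
        rw [getD_modify, if_neg (by tauto)]
      rw [hmod]
      by_cases hc : a + 1 ≤ j ∧ j < a + 1 + b
      · rw [if_pos hc, if_pos (by omega)]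
      · rw [if_neg hc, if_neg (by omega)]

-- B's `p.set i (p[i] + skip)` is a modify at i
lemma pvSet_eq_modify (hist : List (Int × Nat)) (p : List Nat) (i : Nat) :
    p.set i (p.getD i 0 + pvSkip i (hist.drop (p.getD i 0))) =
      p.modify i (fun x => x + pvSkip i (hist.drop x)) := by
  by_cases hi : i < p.length
  · apply List.ext_getElem (by simp)
    intro j h1 h2
    rw [List.getElem_set, List.getElem_modify]
    split
    · rename_i hij; subst hij; rw [List.getD_eq_getElem _ _ hi]
    · rfl
  · rw [List.set_eq_of_length_le (by omega), List.modify_eq_self (by omega)]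

-- A's scan reading queue fronts equals B's pvFrontB, under the invariant row
lemma pvFront_eq (ps : List Int) (qs : List (List Int)) (s : PvStB)
    (i : Nat) (hi : i < ps.length)
    (hrow : s.ptr.getD i 0 ≤ s.hist.length ∧
      pvSkip i (s.hist.drop (s.ptr.getD i 0)) = 0 ∧
      qs.getD i [] =
        (if i = 0 ∧ s.seeded then [1] else []) ++ pvFeeds ps i (s.hist.drop (s.ptr.getD i 0))) :
    (qs.getD i []).head? = pvFrontB ps s.hist s.ptr s.seeded i := by
  obtain ⟨hle, hskip, hqeq⟩ := hrow
  rw [hqeq]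
  unfold pvFrontB
  by_cases hseed : i = 0 ∧ s.seeded
  · rw [if_pos hseed, if_pos hseed]; rfl
  · rw [if_neg hseed, if_neg hseed, List.nil_append]
    by_cases hlt : s.ptr.getD i 0 < s.hist.length
    · rw [if_pos hlt]
      obtain ⟨e, r, hdr⟩ : ∃ e r, s.hist.drop (s.ptr.getD i 0) = e :: r := by
        cases hd : s.hist.drop (s.ptr.getD i 0) with
        | nil =>
          exfalso
          have hlen := congrArg List.length hd
          rw [List.length_drop, List.length_nil] at hlen
          omega
        | cons e r => exact ⟨e, r, rfl⟩
      have he2 : e.2 ≤ i := by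
        rw [hdr] at hskip
        simp only [pvSkip] at hskip
        split at hskip
        · omega
        · omega
      have hget : s.hist.getD (s.ptr.getD i 0) (0, 0) = e := by
        have h0 : (s.hist.drop (s.ptr.getD i 0))[0]? = s.hist[s.ptr.getD i 0 + 0]? :=
          List.getElem?_drop
        rw [hdr] at h0
        simp only [List.getElem?_cons_zero, Nat.add_zero] at h0
        rw [List.getD_eq_getElem?_getD, ← h0]; rfl
      rw [hdr]
      unfold pvFeeds
      rw [List.filter_cons_of_pos (by simpa using he2), List.map_cons, List.head?_cons, hget]
    · rw [if_neg hlt]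
      rw [List.drop_eq_nil_of_le (by omega)]
      simp [pvFeeds]

-- B's selection fold tracks A's scan fold
lemma pvSel_fold (ps : List Int) (qs : List (List Int)) (s : PvStB)
    (l : List Nat)
    (hf : ∀ i ∈ l, (qs.getD i []).head? = pvFrontB ps s.hist s.ptr s.seeded i) :
    ∀ m : Int × Nat,
      l.foldl (pvBestStep ps s.hist s.ptr s.seeded) (some m) =
        some (l.foldl (pvScanA qs) m) := by
  induction l with
  | nil => intro m; rfl
  | cons i l ih =>
    intro m
    rw [List.foldl_cons, List.foldl_cons]
    have hstep : pvBestStep ps s.hist s.ptr s.seeded (some m) i = some (pvScanA qs m i) := by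
      unfold pvBestStep pvScanA
      rw [← hf i (by simp)]
      cases hq : qs.getD i [] with
      | nil => rfl
      | cons h t =>
        simp only [List.head?_cons]
        by_cases hlt : h < m.1
        · rw [if_pos hlt, if_pos (by exact hlt)]
        · rw [if_neg hlt, if_neg (by exact hlt)]
    rw [hstep]
    exact ih (fun j hj => hf j (by simp [hj])) _

-- A's scan result always points at a nonempty queue whose front it is
lemma pvScan_P (ps : List Int) (qs : List (List Int)) (l : List Nat)
    (hl : ∀ i ∈ l, i < ps.length) :
    ∀ m : Int × Nat, m.2 < ps.length → (qs.getD m.2 []).head? = some m.1 →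
      (l.foldl (pvScanA qs) m).2 < ps.length ∧
        (qs.getD (l.foldl (pvScanA qs) m).2 []).head? = some (l.foldl (pvScanA qs) m).1 := by
  induction l with
  | nil => intro m h1 h2; exact ⟨h1, h2⟩
  | cons i l ih =>
    intro m h1 h2
    rw [List.foldl_cons]
    have hstep : (pvScanA qs m i).2 < ps.length ∧
        (qs.getD (pvScanA qs m i).2 []).head? = some (pvScanA qs m i).1 := by
      unfold pvScanA
      cases hq : qs.getD i [] with
      | nil => exact ⟨h1, h2⟩
      | cons h t =>
        dsimp only
        by_cases hlt : m.1 > h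
        · rw [if_pos hlt]
          exact ⟨hl i (by simp), by rw [hq, List.head?_cons]⟩
        · rw [if_neg hlt]
          exact ⟨h1, h2⟩
    exact ih (fun j hj => hl j (by simp [hj])) _ hstep.1 hstep.2

lemma pvFeeds_append (ps : List Int) (j : Nat) (l : List (Int × Nat)) (e : Int × Nat) :
    pvFeeds ps j (l ++ [e]) =
      pvFeeds ps j l ++ (if e.2 ≤ j then [e.1 * ps.getD j 0] else []) := by
  unfold pvFeeds
  rw [List.filter_append, List.map_append]
  congr 1
  split_ifs with h
  · rw [List.filter_cons_of_pos (by simpa using h)]; rfl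
  · rw [List.filter_cons_of_neg (by simpa using h)]; rfl

lemma pvStep_sim (ps : List Int) (hps : ps ≠ []) (v : Int) (qs : List (List Int)) (s : PvStB)
    (h : pvInv ps qs s) :
    (pvStepA ps (v, qs)).1 = (pvStepB ps s).val ∧ pvInv ps (pvStepA ps (v, qs)).2 (pvStepB ps s) := by
  obtain ⟨hq, hp, hq0, hI⟩ := h
  have hn : 0 < ps.length := List.length_pos_iff.mpr hps
  obtain ⟨h0, t0, hq0c⟩ := List.exists_cons_of_ne_nil hq0
  obtain ⟨nn, hnn⟩ : ∃ nn, ps.length = nn + 1 := ⟨ps.length - 1, by omega⟩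
  have hfront : ∀ i, i < ps.length →
      (qs.getD i []).head? = pvFrontB ps s.hist s.ptr s.seeded i :=
    fun i hi => pvFront_eq ps qs s i hi (hI i hi)
  have hmi0 : (qs.getD 0 []).getD 0 0 = h0 := by rw [hq0c]; rfl
  set M := (List.range ps.length).foldl (pvScanA qs) (h0, 0) with hMdef
  have hM0 : pvScanA qs (h0, 0) 0 = (h0, 0) := by
    unfold pvScanA; rw [hq0c]; dsimp only; rw [if_neg (lt_irrefl h0)]
  have hB0 : pvBestStep ps s.hist s.ptr s.seeded none 0 = some (h0, 0) := by
    unfold pvBestStep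
    rw [← hfront 0 hn, hq0c, List.head?_cons]
  have hbest : (List.range ps.length).foldl (pvBestStep ps s.hist s.ptr s.seeded) none = some M := by
    rw [hnn, List.range_succ_eq_map, List.foldl_cons, hB0,
      pvSel_fold ps qs s _ (fun i hi => hfront i (by
        simp only [List.mem_map, List.mem_range] at hi
        obtain ⟨j, hj, rfl⟩ := hi; omega)) (h0, 0)]
    rw [hMdef, hnn, List.range_succ_eq_map, List.foldl_cons, hM0]
  have hMP : M.2 < ps.length ∧ (qs.getD M.2 []).head? = some M.1 := by
    rw [hMdef]
    exact pvScan_P ps qs _ (fun i hi => List.mem_range.mp hi) (h0, 0) hn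
      (by rw [hq0c, List.head?_cons])
  -- explicit forms of the two steps
  have hstepA : pvStepA ps (v, qs) = (M.1,
      (List.range' M.2 (qs.length - M.2)).foldl
        (fun l i => l.modify i (fun q => q ++ [M.1 * ps.getD i 0]))
        (qs.modify M.2 (fun q => q.drop 1))) := by
    simp only [pvStepA, hq, hmi0, ← hMdef, List.length_modify]
  set hist' : List (Int × Nat) := s.hist ++ [(M.1, M.2)] with hhist'
  set ptr1 : List Nat := if M.2 = 0 ∧ s.seeded then s.ptr else s.ptr.modify M.2 (· + 1)
    with hptr1def
  have hfun : (fun (p : List Nat) (i : Nat) =>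
        p.set i (p.getD i 0 + pvSkip i (hist'.drop (p.getD i 0)))) =
      (fun p i => p.modify i (fun x => x + pvSkip i (hist'.drop x))) := by
    funext p i; exact pvSet_eq_modify hist' p i
  have hstepB : pvStepB ps s = PvStB.mk M.1 hist'
      ((List.range' 0 ps.length).foldl
        (fun p i => p.modify i (fun x => x + pvSkip i (hist'.drop x))) ptr1)
      (if M.2 = 0 ∧ s.seeded then false else s.seeded) := by
    simp only [pvStepB, hbest]
    rw [← List.range_eq_range', ← hfun, ← hhist', ← hptr1def]
  set ptr2 : List Nat := (List.range' 0 ps.length).foldl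
      (fun p i => p.modify i (fun x => x + pvSkip i (hist'.drop x))) ptr1 with hptr2def
  have hptr1len : ptr1.length = ps.length := by
    rw [hptr1def]; split
    · exact hp
    · rw [List.length_modify]; exact hp
  have hptr1get : ∀ j, j < ps.length → ptr1.getD j 0 =
      s.ptr.getD j 0 + (if M.2 = j ∧ ¬(M.2 = 0 ∧ s.seeded) then 1 else 0) := by
    intro j hj
    rw [hptr1def]
    by_cases hsc : M.2 = 0 ∧ s.seeded
    · rw [if_pos hsc, if_neg (show ¬(M.2 = j ∧ ¬(M.2 = 0 ∧ s.seeded = true)) from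
        fun hc => hc.2 hsc)]
      omega
    · rw [if_neg hsc, getD_modify]
      by_cases hje : M.2 = j
      · rw [if_pos ⟨hje, by omega⟩, if_pos ⟨hje, hsc⟩]
      · rw [if_neg (show ¬(M.2 = j ∧ j < s.ptr.length) from fun hc => hje hc.1),
          if_neg (show ¬(M.2 = j ∧ ¬(M.2 = 0 ∧ s.seeded = true)) from fun hc => hje hc.1)]
        omega
  have hptr2get : ∀ j, j < ps.length → ptr2.getD j 0 =
      ptr1.getD j 0 + pvSkip j (hist'.drop (ptr1.getD j 0)) := by
    intro j hj
    rw [hptr2def, pvModFold _ ps.length 0 ptr1 j 0 (by omega)]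
    rw [if_pos ⟨Nat.zero_le j, by omega⟩]
  have hqs2get : ∀ j, j < ps.length →
      ((List.range' M.2 (qs.length - M.2)).foldl
        (fun l i => l.modify i (fun q => q ++ [M.1 * ps.getD i 0]))
        (qs.modify M.2 (fun q => q.drop 1))).getD j [] =
      (if M.2 = j then (qs.getD j []).drop 1 else qs.getD j []) ++
        (if M.2 ≤ j then [M.1 * ps.getD j 0] else []) := by
    intro j hj
    rw [pvModFold _ (qs.length - M.2) M.2 _ j [] (by rw [List.length_modify]; omega),
      getD_modify]
    have hM2 : M.2 < qs.length := by omega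
    by_cases hle : M.2 ≤ j
    · rw [if_pos ⟨hle, by omega⟩]
      by_cases hje : M.2 = j
      · rw [if_pos ⟨hje, by omega⟩, if_pos hje, if_pos hle]
      · rw [if_neg (show ¬(M.2 = j ∧ j < qs.length) from fun hc => hje hc.1),
          if_neg hje, if_pos hle]
    · rw [if_neg (show ¬(M.2 ≤ j ∧ j < M.2 + (qs.length - M.2)) by omega),
        if_neg (show ¬(M.2 = j ∧ j < qs.length) by omega),
        if_neg (show ¬(M.2 = j) by omega), if_neg hle, List.append_nil]
  constructor
  · rw [hstepA, hstepB]
  rw [hstepA, hstepB]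
  unfold pvInv
  dsimp only
  refine ⟨?_, ?_, ?_, ?_⟩
  · -- length of A's new queues
    rw [pvModFold_length, List.length_modify]; exact hq
  · -- length of B's new cursors
    rw [pvModFold_length]; exact hptr1len
  · -- queue 0 stays nonempty
    rw [hqs2get 0 hn]
    by_cases hz : M.2 = 0
    · rw [if_pos (show M.2 ≤ 0 by omega)]; simp
    · rw [if_neg hz, if_neg (show ¬M.2 ≤ 0 by omega), List.append_nil]; exact hq0
  intro j hj
  obtain ⟨hle, hsk, hqe⟩ := hI j hj
  have hplen1 : ptr1.getD j 0 ≤ hist'.length := by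
    rw [hptr1get j hj, hhist']
    simp only [List.length_append, List.length_cons, List.length_nil]
    split <;> omega
  have hskle := pvSkip_le j (hist'.drop (ptr1.getD j 0))
  rw [List.length_drop] at hskle
  refine ⟨?_, ?_, ?_⟩
  · rw [hptr2get j hj]; omega
  · rw [hptr2get j hj, ← List.drop_drop]
    exact pvSkip_skip j (hist'.drop (ptr1.getD j 0))
  · -- the queue row
    rw [hqs2get j hj, hptr2get j hj, ← List.drop_drop]
    have hfeed : pvFeeds ps j ((hist'.drop (ptr1.getD j 0)).drop
        (pvSkip j (hist'.drop (ptr1.getD j 0)))) =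
        pvFeeds ps j (hist'.drop (ptr1.getD j 0)) := by
      unfold pvFeeds
      rw [pvSkip_filter]
    rw [hfeed]
    by_cases hsc : M.2 = 0 ∧ s.seeded
    · -- seed still live; it is consumed iff j = 0
      have hms : ptr1.getD j 0 = s.ptr.getD j 0 := by
        rw [hptr1get j hj, if_neg (show ¬(M.2 = j ∧ ¬(M.2 = 0 ∧ s.seeded = true)) from
          fun hc => hc.2 hsc)]
        omega
      rw [hms, hhist', List.drop_append_of_le_length hle, pvFeeds_append]
      by_cases hj0 : j = 0
      · subst hj0
        rw [hqe, if_pos (show (0 = 0 ∧ s.seeded = true) from ⟨rfl, hsc.2⟩),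
          if_pos hsc.1, if_pos (show M.2 ≤ 0 by omega), if_pos hsc]
        simp
      · rw [hqe, if_neg (show ¬(j = 0 ∧ s.seeded = true) from fun hc => hj0 hc.1),
          if_neg (show ¬(j = 0 ∧ (if M.2 = 0 ∧ s.seeded = true then false
            else s.seeded) = true) from fun hc => hj0 hc.1),
          if_neg (show ¬(M.2 = j) by omega), if_pos (show M.2 ≤ j by omega)]
        simp
    · -- no live seed is consumed
      have hseed' : (if M.2 = 0 ∧ s.seeded then false else s.seeded) = s.seeded := by
        rw [if_neg hsc]
      rw [hseed']
      by_cases hje : M.2 = j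
      · -- the popped queue
        have hseedj : ¬(j = 0 ∧ s.seeded = true) :=
          fun hc => hsc ⟨by omega, hc.2⟩
        rw [if_neg hseedj, List.nil_append] at hqe
        have hhd := hMP.2
        rw [hje, hqe] at hhd
        obtain ⟨e, r, hdr⟩ : ∃ e r, s.hist.drop (s.ptr.getD j 0) = e :: r := by
          cases hd : s.hist.drop (s.ptr.getD j 0) with
          | nil => rw [hd] at hhd; simp [pvFeeds] at hhd
          | cons e r => exact ⟨e, r, rfl⟩
        have hplt : s.ptr.getD j 0 < s.hist.length := by
          have := congrArg List.length hdr
          rw [List.length_drop, List.length_cons] at this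
          omega
        have he2 : e.2 ≤ j := by
          rw [hdr] at hsk
          simp only [pvSkip] at hsk
          split at hsk <;> omega
        have hM1 : M.1 = e.1 * ps.getD j 0 := by
          rw [hdr] at hhd
          unfold pvFeeds at hhd
          rw [List.filter_cons_of_pos (by simpa using he2), List.map_cons,
            List.head?_cons] at hhd
          exact (Option.some.inj hhd).symm
        have hp1 : ptr1.getD j 0 = s.ptr.getD j 0 + 1 := by
          rw [hptr1get j hj, if_pos ⟨hje, hsc⟩]
        have hdrop1 : s.hist.drop (s.ptr.getD j 0 + 1) = r := by
          rw [← List.drop_drop, hdr]; rfl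
        rw [hp1, hhist', List.drop_append_of_le_length (by omega), hdrop1,
          pvFeeds_append, if_pos (show M.2 ≤ j by omega)]
        rw [if_pos hje, if_neg hseedj, List.nil_append]
        rw [hqe, hdr]
        unfold pvFeeds
        rw [List.filter_cons_of_pos (by simpa using he2), List.map_cons,
          List.drop_succ_cons, List.drop_zero, hM1]
      · -- untouched queue
        have hms : ptr1.getD j 0 = s.ptr.getD j 0 := by
          rw [hptr1get j hj, if_neg (show ¬(M.2 = j ∧ ¬(M.2 = 0 ∧ s.seeded = true)) from
            fun hc => hje hc.1)]
          omega
        rw [hms, hhist', List.drop_append_of_le_length hle, pvFeeds_append,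
          if_neg hje, hqe, List.append_assoc]

lemma pvLoop_sim (ps : List Int) (hps : ps ≠ []) (t : Nat) :
    ∀ (v : Int) (qs : List (List Int)) (s : PvStB), pvInv ps qs s → v = s.val →
    pvLoopA ps t (v, qs) = pvLoopB ps t s := by
  induction t with
  | zero => intro v qs s _ hv; simpa [pvLoopA, pvLoopB]
  | succ t ih =>
    intro v qs s hinv hv
    obtain ⟨h1, h2⟩ := pvStep_sim ps hps v qs s hinv
    have := ih (pvStepA ps (v, qs)).1 (pvStepA ps (v, qs)).2 (pvStepB ps s) h2 h1
    rw [Prod.mk.eta] at this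
    simpa [pvLoopA, pvLoopB] using this

lemma pvInv_init (ps : List Int) (hps : ps ≠ []) :
    pvInv ps ((ps.map (fun _ => ([] : List Int))).modify 0 (fun q => q ++ [1]))
      ⟨0, [], List.replicate ps.length 0, true⟩ := by
  obtain ⟨p, ps', rfl⟩ := List.exists_cons_of_ne_nil hps
  refine ⟨by simp [List.length_modify], by simp, by simp [List.modify], ?_⟩
  intro i hi
  refine ⟨by simp, by simp [pvSkip], ?_⟩
  rcases i with _ | i
  · simp [List.modify, pvFeeds]
  · simp only [pvFeeds, List.drop_nil, List.filter_nil, List.map_nil, List.append_nil]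
    rw [if_neg (by simp)]
    have hnil : ∀ (l : List Int) (j : Nat), (l.map (fun _ => ([] : List Int))).getD j [] = [] := by
      intro l j
      induction l generalizing j with
      | nil => simp
      | cons a l ih => rcases j with _ | j <;> simp [ih]
    simpa [List.modify] using hnil ps' i

-- ===== VERDICT (by name: the statement is the Claim_ definition above) =====
theorem find_kth_mul_spec : Claim_equal_find_kth_mul := by
  intro ps k _ hpre
  unfold Spec_find_kth_mul find_kth_mul find_kth_mul_alt
  split
  · rfl
  · rename_i hk
    have hps : ps ≠ [] := by
      rcases hpre with h | h
      · exact absurd h hk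
      · exact h
    exact pvLoop_sim ps hps k.toNat 0 _ _ (pvInv_init ps hps) rfl
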